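-- pv_equiv track=rewrite | github.com/Blackpenguin46/Archangel | agents/red_team.py | _select_primary_action
-- ===== SOURCE A (Python) =====
-- from typing import Dict, List, Optional, Any, Tuple
--
-- def _select_primary_action(opportunities: List[str]) -> str:
--     """Select the primary action to execute"""
--     if not opportunities:
--         return "network_discovery"
--
--     # Prioritize based on reconnaissance workflow
--     priority_order = [
--         "network_discovery",
--         "target_enumeration",
--         "service_scanning",
--         "vulnerability_assessment"
--     ]
--
--     for action in priority_order:
--         if action in opportunities:
--             return action
--
--     return opportunities[0]
-- ===== SOURCE B (Python) =====
-- def _select_primary_action(opportunities):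
--     """Select the primary action to execute"""
--     if not opportunities:
--         return "network_discovery"
--
--     priority_order = [
--         "network_discovery",
--         "target_enumeration",
--         "service_scanning",
--         "vulnerability_assessment",
--     ]
--     rank = {name: i for i, name in enumerate(priority_order)}
--
--     candidates = [o for o in opportunities if o in rank]
--     if candidates:
--         return min(candidates, key=rank.get)
--     return opportunities[0]
-- ===== Notes on version B (the rewrite author's own statement) =====
-- stated objective: alternative
-- what changed: Replaces the scan over the fixed priority list with inner membership tests by a rank dictionary built once, a single filter over the opportunities, and min with the rank as key; fallbacks (empty list, no priority present) are preserved.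
import Mathlib
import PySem

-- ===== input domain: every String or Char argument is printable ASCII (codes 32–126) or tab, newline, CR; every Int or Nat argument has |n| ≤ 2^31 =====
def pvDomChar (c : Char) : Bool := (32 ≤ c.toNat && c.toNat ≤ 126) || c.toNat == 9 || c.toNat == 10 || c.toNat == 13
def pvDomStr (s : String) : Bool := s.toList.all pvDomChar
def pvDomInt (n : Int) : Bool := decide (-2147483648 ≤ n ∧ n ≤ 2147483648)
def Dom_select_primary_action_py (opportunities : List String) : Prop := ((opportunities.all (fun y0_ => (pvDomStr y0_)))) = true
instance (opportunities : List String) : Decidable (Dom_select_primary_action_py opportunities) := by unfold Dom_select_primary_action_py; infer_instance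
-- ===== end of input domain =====

-- B replaces A's scan of the fixed priority list (with an inner membership test per priority)
-- by a rank dictionary built once, a filter over the opportunities, and min keyed by rank.


-- ===== PORT A =====
def pvPriority : List String :=
  ["network_discovery", "target_enumeration", "service_scanning", "vulnerability_assessment"]

-- the 'for action in priority_order: if action in opportunities: return action' loop; fb = opportunities[0]
def pvALoop : List String → List String → String → String
  | [], _, fb => fb
  | a :: rest, opps, fb => if a ∈ opps then a else pvALoop rest opps fb

def select_primary_action_py (opportunities : List String) : String :=
  match opportunities with
  | [] => "network_discovery"
  | x :: _ => pvALoop pvPriority opportunities x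

-- ===== PORT B =====
-- rank = {name: i for i, name in enumerate(priority_order)}
def pvRank : PySem.Dict String Int :=
  (PySem.List.enumerate pvPriority).foldl (fun d p => d.insert p.2 p.1) PySem.Dict.empty

def select_primary_action_py_alt (opportunities : List String) : String :=
  match opportunities with
  | [] => "network_discovery"
  | x :: _ =>
    let candidates := opportunities.filter (fun o => (pvRank.get? o).isSome)
    match PySem.List.min? candidates (fun o => (pvRank.get? o).getD 0) with
    | some m => m
    | none => x

-- ===== PRECONDITION & SPEC =====
def Spec_select_primary_action_py (opportunities : List String) (out : String) : Prop := out = select_primary_action_py_alt opportunities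
instance (opportunities : List String) (out : String) : Decidable (Spec_select_primary_action_py opportunities out) := by unfold Spec_select_primary_action_py; infer_instance

-- ===== CLAIM (what is proved, stated in full; the proofs are below) =====
def Claim_equal_select_primary_action_py : Prop := ∀ (opportunities : List String), Dom_select_primary_action_py opportunities → Spec_select_primary_action_py opportunities (select_primary_action_py opportunities)

-- ===== LEMMAS AND PROOFS =====

theorem pvRank_dom (o : String) (h : (pvRank.get? o).isSome = true) :
    o = "network_discovery" ∨ o = "target_enumeration" ∨ o = "service_scanning" ∨ o = "vulnerability_assessment" := by
  simp [pvRank, pvPriority, PySem.List.enumerate, PySem.Dict.get?, PySem.Dict.insert,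
    PySem.Dict.empty] at h
  tauto

theorem pvALoop_none (opps : List String) (x : String)
    (h0 : "network_discovery" ∉ opps) (h1 : "target_enumeration" ∉ opps)
    (h2 : "service_scanning" ∉ opps) (h3 : "vulnerability_assessment" ∉ opps) :
    pvALoop pvPriority opps x = x := by
  simp [pvPriority, pvALoop, h0, h1, h2, h3]

theorem select_primary_action_py_spec : Claim_equal_select_primary_action_py := by
  intro opps _
  unfold Spec_select_primary_action_py select_primary_action_py select_primary_action_py_alt
  cases opps with
  | nil => rfl
  | cons x t =>
    simp only
    set cand := (x :: t).filter (fun o => (pvRank.get? o).isSome) with hcand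
    have hmemcand : ∀ o, o ∈ x :: t → (pvRank.get? o).isSome = true → o ∈ cand := by
      intro o ho hs; rw [hcand]; exact List.mem_filter.mpr ⟨ho, hs⟩
    cases hmin : PySem.List.min? cand (fun o => (pvRank.get? o).getD 0) with
    | none =>
      have hnil : cand = [] := (PySem.List.min?_eq_none_iff _ _).mp hmin
      have habs : ∀ o, o ∈ x :: t → (pvRank.get? o).isSome = true → False := by
        intro o ho hs
        have := hmemcand o ho hs
        rw [hnil] at this; exact (List.not_mem_nil) this
      exact pvALoop_none (x :: t) x
        (fun h => habs _ h (by decide)) (fun h => habs _ h (by decide))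
        (fun h => habs _ h (by decide)) (fun h => habs _ h (by decide))
    | some m =>
      have hm := PySem.List.min?_mem hmin
      have hmin' := PySem.List.min?_isMin hmin
      rw [hcand] at hm
      have hmo : m ∈ x :: t := (List.mem_filter.mp hm).1
      have hms : (pvRank.get? m).isSome = true := by
        simpa using (List.mem_filter.mp hm).2
      rcases pvRank_dom m hms with h | h | h | h
      all_goals subst h
      · -- m = "network_discovery": first branch of A fires
        simp [pvALoop, pvPriority, hmo]
      · have h0 : "network_discovery" ∉ x :: t := by
          intro hin
          have := hmin' _ (hmemcand _ hin (by decide))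
          simp [pvRank, pvPriority, PySem.List.enumerate, PySem.Dict.get?, PySem.Dict.insert,
            PySem.Dict.empty] at this
        simp [pvALoop, pvPriority, h0, hmo]
      · have h0 : "network_discovery" ∉ x :: t := by
          intro hin
          have := hmin' _ (hmemcand _ hin (by decide))
          simp [pvRank, pvPriority, PySem.List.enumerate, PySem.Dict.get?, PySem.Dict.insert,
            PySem.Dict.empty] at this
        have h1 : "target_enumeration" ∉ x :: t := by
          intro hin
          have := hmin' _ (hmemcand _ hin (by decide))
          simp [pvRank, pvPriority, PySem.List.enumerate, PySem.Dict.get?, PySem.Dict.insert,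
            PySem.Dict.empty] at this
        simp [pvALoop, pvPriority, h0, h1, hmo]
      · have h0 : "network_discovery" ∉ x :: t := by
          intro hin
          have := hmin' _ (hmemcand _ hin (by decide))
          simp [pvRank, pvPriority, PySem.List.enumerate, PySem.Dict.get?, PySem.Dict.insert,
            PySem.Dict.empty] at this
        have h1 : "target_enumeration" ∉ x :: t := by
          intro hin
          have := hmin' _ (hmemcand _ hin (by decide))
          simp [pvRank, pvPriority, PySem.List.enumerate, PySem.Dict.get?, PySem.Dict.insert,
            PySem.Dict.empty] at this
        have h2 : "service_scanning" ∉ x :: t := by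
          intro hin
          have := hmin' _ (hmemcand _ hin (by decide))
          simp [pvRank, pvPriority, PySem.List.enumerate, PySem.Dict.get?, PySem.Dict.insert,
            PySem.Dict.empty] at this
        simp [pvALoop, pvPriority, h0, h1, h2, hmo]
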